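-- pv_equiv track=rewrite | github.com/mrg327/word_games | functions/grid.py | decode_paths
-- ===== SOURCE A (Python) =====
-- def decode_paths(grid, paths):
--     '''This function will decode the paths and return a list of tuples.'''
--     # The tuple looks like (str: word, list: (str: direction, int: cell))
--     # each tuple contins a word and an interior list of tuples
--     # each interior tuple contains a direction and a cell and it is the length of the word
--     # valid directions are: n, ne, e, se, s, sw, w, nw
--     # valid cells are: 0:15
--     decoded_paths = []
--     for path in paths:
--         decoded_path = []
--         for i in range(len(path[1])-1):
--             r, c = path[1][i]
--             decoded_path.append((decode_direction(grid, path[1][i], path[1][i+1]), r*len(grid)+c))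
--         decoded_paths.append(decoded_path)
--         # add the last cell
--         r, c = path[1][-1]
--         decoded_paths[-1].append((None, r*len(grid)+c))
--     return decoded_paths
--
-- def decode_direction(grid, cell1, cell2):
--     '''This function will return the direction from cell1 to cell2.'''
--     dir_str = ''
--     if cell1[0] > cell2[0]:
--         dir_str += 'n'
--     elif cell1[0] < cell2[0]:
--         dir_str += 's'
--     if cell1[1] > cell2[1]:
--         dir_str += 'w'
--     elif cell1[1] < cell2[1]:
--         dir_str += 'e'
--     return dir_str
-- ===== SOURCE B (Python) =====
-- def decode_paths(grid, paths):
--     n = len(grid)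
--
--     def walk(cells):
--         a = cells[0]          # raises IndexError on an empty path, like A's path[1][-1]
--         rest = cells[1:]
--         if not rest:
--             return [(None, a[0] * n + a[1])]
--         b = rest[0]
--         d = (('n' if a[0] > b[0] else 's' if a[0] < b[0] else '')
--              + ('w' if a[1] > b[1] else 'e' if a[1] < b[1] else ''))
--         return [(d, a[0] * n + a[1])] + walk(rest)
--
--     return [walk(cells) for _word, cells in paths]
-- ===== Notes on version B (the rewrite author's own statement) =====
-- stated objective: alternative
-- what changed: A's imperative index loop over range(len-1) with i/i+1 lookups plus a separate special-case append of the last cell is replaced by a structural recursion on the cell list whose base case ([a]) naturally yields the terminal (None, idx) entry, so no index arithmetic or last-cell patch exists.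
import Mathlib
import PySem

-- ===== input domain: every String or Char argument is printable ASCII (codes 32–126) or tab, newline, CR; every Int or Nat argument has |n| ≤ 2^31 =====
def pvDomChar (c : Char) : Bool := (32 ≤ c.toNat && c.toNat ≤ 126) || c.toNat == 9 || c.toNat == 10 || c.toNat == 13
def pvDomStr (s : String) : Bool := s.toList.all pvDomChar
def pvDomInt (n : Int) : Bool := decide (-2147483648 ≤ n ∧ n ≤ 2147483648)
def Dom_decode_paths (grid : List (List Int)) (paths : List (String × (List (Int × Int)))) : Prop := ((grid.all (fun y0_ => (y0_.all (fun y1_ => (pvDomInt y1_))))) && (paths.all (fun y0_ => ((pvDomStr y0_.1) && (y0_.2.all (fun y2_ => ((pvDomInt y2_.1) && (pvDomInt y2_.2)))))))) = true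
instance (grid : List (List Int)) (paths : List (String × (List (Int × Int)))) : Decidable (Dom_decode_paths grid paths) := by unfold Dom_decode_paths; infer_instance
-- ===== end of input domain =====

-- B replaces A's index loop plus special last-cell append by a structural recursion on the cell
-- list whose singleton base case yields the terminal (None, idx) entry; objective: alternative.

-- ===== PORT A =====
-- decode_direction from Source A: dir_str built up by += in branch order
def decode_direction (grid : List (List Int)) (cell1 cell2 : Int × Int) : String :=
  let dir_str : String := ""
  let dir_str := if cell1.1 > cell2.1 then dir_str ++ "n"
                 else if cell1.1 < cell2.1 then dir_str ++ "s" else dir_str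
  let dir_str := if cell1.2 > cell2.2 then dir_str ++ "w"
                 else if cell1.2 < cell2.2 then dir_str ++ "e" else dir_str
  dir_str

def decode_paths (grid : List (List Int)) (paths : List (String × (List (Int × Int)))) : List (List (Option String × Int)) :=
  paths.foldl (fun decoded_paths path =>
    let cells := path.2
    let decoded_path := (PySem.List.pyRange 0 ((cells.length : Int) - 1) 1).foldl
      (fun dp i =>
        match PySem.List.pyGet? cells i, PySem.List.pyGet? cells (i + 1) with
        | some c1, some c2 =>
            dp ++ [(some (decode_direction grid c1 c2), c1.1 * (grid.length : Int) + c1.2)]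
        | _, _ => dp) []   -- pyGet? is always some here: i ranges over valid indices
    -- add the last cell: path[1][-1]; none = IndexError on an empty cells list (outside Pre_)
    match PySem.List.pyGet? cells (-1) with
    | some rc => decoded_paths ++ [decoded_path ++ [(none, rc.1 * (grid.length : Int) + rc.2)]]
    | none => decoded_paths ++ [decoded_path]) []

-- ===== PORT B =====
-- walk from Source B: structural recursion; [] = the IndexError case of cells[0] (outside Pre_)
def pvWalk (n : Int) : List (Int × Int) → List (Option String × Int)
  | [] => []
  | a :: rest =>
    match rest with
    | [] => [(none, a.1 * n + a.2)]
    | b :: _ =>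
      (some ((if a.1 > b.1 then "n" else if a.1 < b.1 then "s" else "")
              ++ (if a.2 > b.2 then "w" else if a.2 < b.2 then "e" else "")),
       a.1 * n + a.2) :: pvWalk n rest

def decode_paths_alt (grid : List (List Int)) (paths : List (String × (List (Int × Int)))) : List (List (Option String × Int)) :=
  let n : Int := (grid.length : Int)
  paths.map (fun p => pvWalk n p.2)

-- ===== PRECONDITION & SPEC =====
-- Pre_ excludes paths with an empty cell list, on which A's path[1][-1] raises IndexError (B's cells[0] raises too).
def Pre_decode_paths (grid : List (List Int)) (paths : List (String × (List (Int × Int)))) : Prop :=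
  ∀ p ∈ paths, p.2 ≠ []
instance (grid : List (List Int)) (paths : List (String × (List (Int × Int)))) : Decidable (Pre_decode_paths grid paths) := by unfold Pre_decode_paths; infer_instance

def pvWitness_decode_paths : List (List Int) × (List (String × (List (Int × Int)))) :=
  ([[1, 2], [3, 4]], [("ab", [(0, 0), (0, 1), (1, 1)]), ("c", [(1, 0)])])

def Spec_decode_paths (grid : List (List Int)) (paths : List (String × (List (Int × Int)))) (out : List (List (Option String × Int))) : Prop := out = decode_paths_alt grid paths
instance (grid : List (List Int)) (paths : List (String × (List (Int × Int)))) (out : List (List (Option String × Int))) : Decidable (Spec_decode_paths grid paths out) := by unfold Spec_decode_paths; infer_instance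

-- ===== CLAIM (what is proved, stated in full; the proofs are below) =====
def Claim_equal_decode_paths : Prop := ∀ (grid : List (List Int)) (paths : List (String × (List (Int × Int)))), Dom_decode_paths grid paths → Pre_decode_paths grid paths → Spec_decode_paths grid paths (decode_paths grid paths)

-- ===== LEMMAS AND PROOFS =====

-- the direction built in pvWalk equals A's decode_direction
theorem dir_eq (grid : List (List Int)) (c1 c2 : Int × Int) :
    decode_direction grid c1 c2
      = (if c1.1 > c2.1 then "n" else if c1.1 < c2.1 then "s" else "")
          ++ (if c1.2 > c2.2 then "w" else if c1.2 < c2.2 then "e" else "") := by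
  unfold decode_direction
  split_ifs <;> rfl

theorem pyGetD_cons_succ {α : Type} (xs : List α) (i : Int) (x d : α) (h : 0 ≤ i) :
    PySem.List.pyGetD (x :: xs) (i + 1) d = PySem.List.pyGetD xs i d := by
  obtain ⟨n, rfl⟩ := Int.eq_ofNat_of_zero_le h
  have : ((n : Int) + 1) = ((n + 1 : Nat) : Int) := by push_cast; ring
  rw [this, PySem.List.pyGetD_natCast, PySem.List.pyGetD_natCast]
  simp

theorem map_pyRange_shift {β : Type} (f : Int → β) (m : Int) (h : 0 ≤ m) :
    (PySem.List.pyRange 1 (m + 1) 1).map f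
      = (PySem.List.pyRange 0 m 1).map (fun i => f (i + 1)) := by
  rw [PySem.List.pyRange_one, PySem.List.pyRange_one]
  simp [List.map_map]
  intro a _
  rw [add_comm]

-- A's index loop, in map form, equals the map over adjacent pairs
theorem loop_eq_zip {β : Type} (h : (Int × Int) → (Int × Int) → β) (d : Int × Int) :
    ∀ (cells : List (Int × Int)),
      (PySem.List.pyRange 0 ((cells.length : Int) - 1) 1).map
        (fun i => h (PySem.List.pyGetD cells i d) (PySem.List.pyGetD cells (i + 1) d))
        = (cells.zip cells.tail).map (fun ab => h ab.1 ab.2) := by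
  intro cells
  induction cells with
  | nil => simp [PySem.List.pyRange_one_eq_nil]
  | cons a t ih =>
    cases t with
    | nil => simp [PySem.List.pyRange_one_eq_nil]
    | cons b u =>
      have hlen : ((((a :: b :: u).length : Int)) - 1) = (((b :: u).length : Int) - 1) + 1 := by
        simp only [List.length_cons]; push_cast; ring
      rw [hlen, PySem.List.pyRange_one_cons (by simp only [List.length_cons]; push_cast; omega)]
      simp only [List.map_cons, zero_add]
      have h0 : PySem.List.pyGetD (a :: b :: u) 0 d = a := PySem.List.pyGetD_zero_cons _ _ _
      have h1 : PySem.List.pyGetD (a :: b :: u) (0 + 1) d = b := by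
        rw [pyGetD_cons_succ _ _ _ _ le_rfl, PySem.List.pyGetD_zero_cons]
      rw [show (0:Int) + 1 = 1 from rfl] at h1
      rw [h0, h1, map_pyRange_shift _ _ (by simp only [List.length_cons]; push_cast; omega)]
      have hbody : (PySem.List.pyRange 0 (((b :: u).length : Int) - 1) 1).map
          (fun i => h (PySem.List.pyGetD (a :: b :: u) (i + 1) d)
                      (PySem.List.pyGetD (a :: b :: u) (i + 1 + 1) d))
          = (PySem.List.pyRange 0 (((b :: u).length : Int) - 1) 1).map
          (fun i => h (PySem.List.pyGetD (b :: u) i d) (PySem.List.pyGetD (b :: u) (i + 1) d)) := by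
        apply List.map_congr_left
        intro i hi
        have hmem := (PySem.List.mem_pyRange_one).mp hi
        rw [pyGetD_cons_succ _ _ _ _ hmem.1, pyGetD_cons_succ _ _ _ _ (by omega)]
      rw [hbody, ih]
      simp

-- inside the loop both gets are some, so the match body equals the pyGetD body
theorem loop_match_eq_getD (grid : List (List Int)) (cells : List (Int × Int)) :
    (PySem.List.pyRange 0 ((cells.length : Int) - 1) 1).foldl
      (fun dp i =>
        match PySem.List.pyGet? cells i, PySem.List.pyGet? cells (i + 1) with
        | some c1, some c2 =>
            dp ++ [(some (decode_direction grid c1 c2), c1.1 * (grid.length : Int) + c1.2)]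
        | _, _ => dp) []
    = (PySem.List.pyRange 0 ((cells.length : Int) - 1) 1).foldl
      (fun dp i =>
        let c1 := PySem.List.pyGetD cells i (0, 0)
        let c2 := PySem.List.pyGetD cells (i + 1) (0, 0)
        dp ++ [(some (decode_direction grid c1 c2), c1.1 * (grid.length : Int) + c1.2)]) [] := by
  apply PySem.List.foldl_congr_mem
  intro dp i hi
  have hmem := (PySem.List.mem_pyRange_one).mp hi
  have key : ∀ j : Int, 0 ≤ j → j < (cells.length : Int) →
      PySem.List.pyGet? cells j = some (PySem.List.pyGetD cells j (0, 0)) := by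
    intro j hj0 hj1
    obtain ⟨n, rfl⟩ := Int.eq_ofNat_of_zero_le hj0
    have hn : n < cells.length := by exact_mod_cast hj1
    simp [List.getD, List.getElem?_eq_getElem hn]
  rw [key i hmem.1 (by omega), key (i + 1) (by omega) (by omega)]

-- B's recursion unrolled: adjacent-pair entries followed by the terminal (none, last) entry
theorem walk_eq (grid : List (List Int)) :
    ∀ (cells : List (Int × Int)) (h : cells ≠ []),
      pvWalk (grid.length : Int) cells
        = (cells.zip cells.tail).map
            (fun ab => ((some (decode_direction grid ab.1 ab.2) : Option String),
                        ab.1.1 * (grid.length : Int) + ab.1.2))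
          ++ [((none : Option String),
               (cells.getLast h).1 * (grid.length : Int) + (cells.getLast h).2)] := by
  intro cells
  induction cells with
  | nil => intro h; exact absurd rfl h
  | cons a t ih =>
    intro _
    cases t with
    | nil => simp [pvWalk]
    | cons b u =>
      have step : pvWalk (grid.length : Int) (a :: b :: u)
          = ((some ((if a.1 > b.1 then "n" else if a.1 < b.1 then "s" else "")
              ++ (if a.2 > b.2 then "w" else if a.2 < b.2 then "e" else "")) : Option String),
             a.1 * (grid.length : Int) + a.2) :: pvWalk (grid.length : Int) (b :: u) := rfl
      simp only [List.tail_cons] at ih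
      rw [step, ih (by simp), ← dir_eq grid a b]
      simp [List.getLast_cons_cons]

-- per-path equality on a nonempty cell list: A's inner computation equals pvWalk
theorem inner_eq (grid : List (List Int)) (cells : List (Int × Int)) (hne : cells ≠ []) :
    (let decoded_path := (PySem.List.pyRange 0 ((cells.length : Int) - 1) 1).foldl
       (fun dp i =>
         match PySem.List.pyGet? cells i, PySem.List.pyGet? cells (i + 1) with
         | some c1, some c2 =>
             dp ++ [(some (decode_direction grid c1 c2), c1.1 * (grid.length : Int) + c1.2)]
         | _, _ => dp) []
     match PySem.List.pyGet? cells (-1) with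
     | some rc => decoded_path ++ [((none : Option String), rc.1 * (grid.length : Int) + rc.2)]
     | none => decoded_path)
    = pvWalk (grid.length : Int) cells := by
  rw [PySem.List.pyGet?_neg_one, List.getLast?_eq_some_getLast hne]
  simp only [loop_match_eq_getD]
  rw [PySem.List.foldl_append_singleton_eq_map, walk_eq grid cells hne]
  simp only [List.nil_append]
  rw [loop_eq_zip (fun c1 c2 => ((some (decode_direction grid c1 c2) : Option String),
        c1.1 * (grid.length : Int) + c1.2)) (0, 0) cells]

-- ===== VERDICT (by name: the statement is the Claim_ definition above) =====
theorem decode_paths_spec : Claim_equal_decode_paths := by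
  intro grid paths _ hpre
  unfold Spec_decode_paths decode_paths decode_paths_alt
  rw [PySem.List.foldl_congr_mem _ _
    (fun acc p => acc ++ [pvWalk (grid.length : Int) p.2]) []
    (by
      intro acc p hp
      have h := inner_eq grid p.2 (hpre p hp)
      simp only at h
      simp only [← h]
      rw [PySem.List.pyGet?_neg_one, List.getLast?_eq_some_getLast (hpre p hp)])]
  rw [PySem.List.foldl_append_singleton_eq_map]
  simp
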